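-- pv_equiv track=rewrite | github.com/Azertinv/cipher_bruteforcer | common.py | get_isomorphs
-- ===== SOURCE A (Python) =====
-- def get_isomorphs(ct, max_size):
--     isomorphs = set()
--     for i, l in enumerate(ct):
--         offset = ct.find(l, i + 1, i + max_size + 1)
--         while offset != -1:
--             isomorphs.add((i, offset - i - 1))
--             offset = ct.find(l, offset + 1, i + max_size + 1)
--     return isomorphs
-- ===== SOURCE B (Python) =====
-- def get_isomorphs(ct, max_size):
--     # occurrence-index algorithm: occ[c] = ascending positions of c, rank[i] =
--     # index of position i inside occ[ct[i]]; scan forward from there, break at window edge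
--     occ = {}
--     rank = []
--     for j, c in enumerate(ct):
--         ps = occ.setdefault(c, [])
--         rank.append(len(ps))
--         ps.append(j)
--     res = set()
--     for i, c in enumerate(ct):
--         ps = occ[c]
--         for k in range(rank[i] + 1, len(ps)):
--             j = ps[k]
--             if j - i > max_size:
--                 break
--             res.add((i, j - i - 1))
--     return res
-- ===== Notes on version B (the rewrite author's own statement) =====
-- stated objective: alternative
-- what changed: A rescans the window with repeated str.find calls per index; B precomputes a char->ascending-positions dict plus each position's rank in its list once, then per index scans its occurrence list forward from that rank, stopping at the window edge (output-sensitive, no string searching).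
-- intended difference: For max_size < 0 Python's str.find treats A's negative stop i+max_size+1 as an index from the end of the string, so A returns pairs of equal characters near the string's end; B returns the empty set, the intended value for an empty window. — e.g. on get_isomorphs("aaaa", -2): A returns [(0, 0), (0, 1)], B returns []
import Mathlib
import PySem

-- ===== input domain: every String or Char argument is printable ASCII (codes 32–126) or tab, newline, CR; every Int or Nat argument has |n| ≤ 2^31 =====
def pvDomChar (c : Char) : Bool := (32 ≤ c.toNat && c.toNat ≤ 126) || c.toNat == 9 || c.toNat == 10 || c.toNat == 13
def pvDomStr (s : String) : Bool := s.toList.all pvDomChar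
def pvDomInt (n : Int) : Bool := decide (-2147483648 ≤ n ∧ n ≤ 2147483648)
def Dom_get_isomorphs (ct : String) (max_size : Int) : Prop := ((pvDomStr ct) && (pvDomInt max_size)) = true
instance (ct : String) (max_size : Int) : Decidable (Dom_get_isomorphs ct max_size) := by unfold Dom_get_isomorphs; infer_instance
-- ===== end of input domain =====

-- B replaces A's repeated windowed str.find scans by a precomputed char→positions
-- index scanned per position; objective: alternative algorithm of comparable cost.

-- ===== PORT A =====
-- the 'while offset != -1' loop; the fuel argument (number of positions + 1 suffices)
-- only makes the recursion structural, it never cuts the loop short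
def pvFindLoopA (s : List Char) (l : Char) (i stop : Int) :
    Int → List (Int × Int) → Nat → List (Int × Int)
  | _, iso, 0 => iso
  | offset, iso, Nat.succ fuel =>
    if offset = -1 then iso
    else pvFindLoopA s l i stop (PySem.Chars.findFrom s [l] (offset + 1) (some stop))
          (PySem.Set.add iso (i, offset - i - 1)) fuel

def get_isomorphs (ct : String) (max_size : Int) : List (Int × Int) :=
  (PySem.List.enumerate ct.toList).foldl
    (fun iso p =>
      pvFindLoopA ct.toList p.2 p.1 (p.1 + max_size + 1)
        (PySem.Chars.findFrom ct.toList [p.2] (p.1 + 1) (some (p.1 + max_size + 1)))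
        iso (ct.toList.length + 1))
    PySem.Set.empty

-- ===== PORT B =====
-- first pass of Source B: occ = dict char → ascending positions, rank = per-position
-- index of that position inside its occ list ('ps = occ.setdefault(c, []);
-- rank.append(len(ps)); ps.append(j)' — the in-place append is the dict overwrite here)
def pvOccBuild (s : List Char) : PySem.Dict Char (List Int) × List Nat :=
  (PySem.List.enumerate s).foldl
    (fun st p =>
      (st.1.insert p.2 ((st.1.getD p.2 []) ++ [p.1]), st.2 ++ [(st.1.getD p.2 []).length]))
    (PySem.Dict.empty, [])

-- the inner 'for k in range(rank[i] + 1, len(ps)): … break' loop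
def pvScanB (i max_size : Int) (ps : List Int) :
    List Int → List (Int × Int) → List (Int × Int)
  | [], res => res
  | k :: ks, res =>
    if max_size < PySem.List.pyGetD ps k 0 - i then res
    else pvScanB i max_size ps ks
      (PySem.Set.add res (i, PySem.List.pyGetD ps k 0 - i - 1))

def get_isomorphs_alt (ct : String) (max_size : Int) : List (Int × Int) :=
  (PySem.List.enumerate ct.toList).foldl
    (fun res p =>
      pvScanB p.1 max_size ((pvOccBuild ct.toList).1.getD p.2 [])
        (PySem.List.pyRange
          ((PySem.List.pyGetD (pvOccBuild ct.toList).2 p.1 0 + 1 : Nat) : Int)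
          (((pvOccBuild ct.toList).1.getD p.2 []).length : Int))
        res)
    []

-- ===== PRECONDITION & SPEC =====
-- For max_size < 0 Python's str.find turns A's negative stop i+max_size+1 into an index
-- counted from the END of the string, so A accidentally pairs characters near the end of
-- the string; B returns the empty set there, the intended value for an empty window.
def D_get_isomorphs (ct : String) (max_size : Int) : Prop :=
  max_size < 0 ∧ ∃ i ∈ Finset.range ct.toList.length, ∃ j ∈ Finset.range ct.toList.length,
    i < j ∧ ct.toList[i]? = ct.toList[j]? ∧ (i : Int) + max_size + 1 < 0 ∧
    (j : Int) < (ct.toList.length : Int) + i + max_size + 1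
instance (ct : String) (max_size : Int) : Decidable (D_get_isomorphs ct max_size) := by
  unfold D_get_isomorphs; infer_instance

def Spec_get_isomorphs (ct : String) (max_size : Int) (out : List (Int × Int)) : Prop :=
  ¬ D_get_isomorphs ct max_size → out = get_isomorphs_alt ct max_size
instance (ct : String) (max_size : Int) (out : List (Int × Int)) : Decidable (Spec_get_isomorphs ct max_size out) := by
  unfold Spec_get_isomorphs; infer_instance

def pvDiffWitness_get_isomorphs : String × Int := ("aaaa", -2)
def pvDiffWitnessOut_get_isomorphs : (List (Int × Int)) × (List (Int × Int)) :=
  ([(0, 0), (0, 1)], [])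

-- ===== CLAIM (what is proved, stated in full; the proofs are below) =====
def Claim_unchanged_get_isomorphs : Prop := ∀ (ct : String) (max_size : Int), Dom_get_isomorphs ct max_size → Spec_get_isomorphs ct max_size (get_isomorphs ct max_size)
def Claim_changed_get_isomorphs : Prop := Dom_get_isomorphs (pvDiffWitness_get_isomorphs.1) (pvDiffWitness_get_isomorphs.2) ∧ D_get_isomorphs (pvDiffWitness_get_isomorphs.1) (pvDiffWitness_get_isomorphs.2) ∧ get_isomorphs (pvDiffWitness_get_isomorphs.1) (pvDiffWitness_get_isomorphs.2) = pvDiffWitnessOut_get_isomorphs.1 ∧ get_isomorphs_alt (pvDiffWitness_get_isomorphs.1) (pvDiffWitness_get_isomorphs.2) = pvDiffWitnessOut_get_isomorphs.2 ∧ pvDiffWitnessOut_get_isomorphs.1 ≠ pvDiffWitnessOut_get_isomorphs.2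
def Claim_exact_get_isomorphs : Prop := ∀ (ct : String) (max_size : Int), Dom_get_isomorphs ct max_size → D_get_isomorphs ct max_size → get_isomorphs ct max_size ≠ get_isomorphs_alt ct max_size

-- ===== LEMMAS AND PROOFS =====

-- ---------- generic helpers ----------
lemma pvPrefixSingle (u : List Char) (l : Char) : [l] <+: u ↔ u[0]? = some l := by
  cases u <;> simp [eq_comm]

lemma pvHeadFilterRange {n m : Nat} {p : Nat → Bool} (hm : m < n) (hp : p m)
    (hmin : ∀ i < m, ¬ p i) : ((List.range n).filter p).head? = some m := by
  have hsplit : List.range n = List.range' 0 m ++ List.range' m (n - m) := by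
    rw [List.range_eq_range']
    have := @List.range'_append 0 m (n - m) 1
    simp at this
    rw [this]; congr 1; omega
  rw [hsplit, List.filter_append]
  have h1 : (List.range' 0 m).filter p = [] := by
    rw [List.filter_eq_nil_iff]
    intro a ha; exact hmin a (by simpa using List.mem_range'_1.mp ha |>.2)
  have h2 : List.range' m (n - m) = m :: List.range' (m+1) (n - m - 1) := by
    have h3 : n - m = (n - m - 1) + 1 := by omega
    rw [h3, List.range'_succ]; simp
  rw [h1, h2]
  simp [hp]

lemma pvRange_split (a b n : Nat) (hab : a ≤ b) (hbn : b ≤ n) :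
    List.range' a (n - a) = List.range' a (b - a) ++ List.range' b (n - b) := by
  have h0 := (@List.range'_append a (b - a) (n - b) 1).symm
  rw [show a + 1 * (b - a) = b from by omega] at h0
  rw [show b - a + (n - b) = n - a from by omega] at h0
  exact h0

-- ---------- A side: characterising the find chain ----------
-- the clamped stop index Python's find uses, as a Nat
def pvE (n : Nat) (e0 : Int) : Nat :=
  (if (n : Int) < e0 then (n : Int)
   else if e0 < 0 then (if e0 + n < 0 then 0 else e0 + n) else e0).toNat

-- ascending positions of l in s within [a, e)
def pvOccF (s : List Char) (l : Char) (a e : Nat) : List Nat :=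
  (List.range' a (e - a)).filter (fun j => s[j]? = some l)

lemma pvE_le (n : Nat) (e0 : Int) : pvE n e0 ≤ n := by
  unfold pvE; split_ifs <;> omega

lemma pvFindSingle (t : List Char) (l : Char) :
    PySem.Chars.find t [l] =
      match ((List.range t.length).filter (fun k => t[k]? = some l)).head? with
      | none => -1
      | some k => (k : Int) := by
  by_cases hmem : l ∈ t
  · have hne : PySem.Chars.find t [l] ≠ -1 := by
      rw [PySem.Chars.find_ne_neg_one_iff]
      exact (List.singleton_infix_iff l t).mpr hmem
    have hge : 0 ≤ PySem.Chars.find t [l] := by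
      have := PySem.Chars.neg_one_le_find t [l]; omega
    obtain ⟨hpre, hmin⟩ := PySem.Chars.find_spec hge
    set m := (PySem.Chars.find t [l]).toNat with hm
    have hTm : t[m]? = some l := by
      have := (pvPrefixSingle (t.drop m) l).mp hpre
      simpa using this
    have hmlt : m < t.length := by
      by_contra h
      rw [List.getElem?_eq_none_iff.mpr (by omega)] at hTm; cases hTm
    have hmins : ∀ i < m, ¬ (fun k => decide (t[k]? = some l)) i = true := by
      intro i hi hq
      exact hmin i hi ((pvPrefixSingle (t.drop i) l).mpr (by simpa using of_decide_eq_true hq))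
    rw [pvHeadFilterRange hmlt (by simp [hTm]) hmins]
    simp [hm]
    exact hge
  · have h1 : PySem.Chars.find t [l] = -1 := by
      rw [PySem.Chars.find_eq_neg_one_iff]
      intro h; exact hmem ((List.singleton_infix_iff l t).mp h)
    rw [h1]
    have h2 : ((List.range t.length).filter (fun k => t[k]? = some l)).head? = none := by
      simp only [List.head?_eq_none_iff, List.filter_eq_nil_iff]
      intro a ha hc
      simp only [decide_eq_true_eq] at hc
      exact hmem (List.mem_of_getElem? hc)
    rw [h2]

lemma pvFindFromSingle (s : List Char) (l : Char) (a : Nat) (b : Int) :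
    PySem.Chars.findFrom s [l] (a : Int) (some b) =
      match (pvOccF s l a (pvE s.length b)).head? with
      | none => -1
      | some j => (j : Int) := by
  have hE : (if ((s.length : Int)) < b then ((s.length : Int))
      else if b < 0 then (if b + s.length < 0 then 0 else b + s.length) else b)
      = ((pvE s.length b : Nat) : Int) := by
    unfold pvE; split_ifs <;> simp <;> omega
  unfold PySem.Chars.findFrom
  simp only [hE, not_lt.mpr (Int.natCast_nonneg a), if_false]
  set E := pvE s.length b with hEdef
  by_cases hlt : (E : Int) < (a : Int)
  · rw [if_pos hlt]
    have : E - a = 0 := by omega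
    simp [pvOccF, this]
  · rw [if_neg hlt]
    have haE : a ≤ E := by omega
    have hEn : E ≤ s.length := pvE_le _ _
    set t := List.drop ((a : Int)).toNat (List.take ((E : Int)).toNat s) with ht
    have ht' : t = List.drop a (List.take E s) := by simp [ht]
    have htlen : t.length = E - a := by simp [ht']; omega
    have htget : ∀ k, k < E - a → t[k]? = s[a + k]? := by
      intro k hk
      rw [ht', List.getElem?_drop, List.getElem?_take]
      rw [if_pos (by omega)]
    have hocc : (pvOccF s l a E).head? =
        (((List.range t.length).filter (fun k => t[k]? = some l)).head?).map (fun k => a + k) := by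
      have h1 : pvOccF s l a E
          = ((List.range (E - a)).map (fun k => a + k)).filter (fun j => s[j]? = some l) := by
        rw [pvOccF, List.range'_eq_map_range]
      rw [h1, List.filter_map, List.head?_map, htlen]
      have hfc : List.filter ((fun j => decide (s[j]? = some l)) ∘ fun k => a + k)
            (List.range (E - a)) = List.filter (fun k => decide (t[k]? = some l))
            (List.range (E - a)) := by
        apply List.filter_congr
        intro k hk
        simp only [Function.comp]
        rw [htget k (by simpa using hk)]
      rw [hfc]
    rw [pvFindSingle t l, hocc]
    cases hh : ((List.range t.length).filter (fun k => t[k]? = some l)).head? with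
    | none => simp
    | some k =>
      have : ¬ ((k : Int) = -1) := by omega
      simp [this]

lemma pvOccF_head_cons {s : List Char} {l : Char} {a e j : Nat}
    (h : (pvOccF s l a e).head? = some j) :
    pvOccF s l a e = j :: pvOccF s l (j+1) e ∧ a ≤ j ∧ j < e := by
  have hjmem : j ∈ pvOccF s l a e := by
    cases hx : pvOccF s l a e with
    | nil => rw [hx] at h; cases h
    | cons x xs => rw [hx] at h; simp at h; simp [h]
  have hbounds : a ≤ j ∧ j < e := by
    have := List.mem_range'_1.mp (List.mem_of_mem_filter hjmem)
    omega
  obtain ⟨haj, hje⟩ := hbounds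
  have hsplit := pvRange_split a j e haj (by omega)
  have hsplit2 : List.range' j (e - j) = j :: List.range' (j+1) (e - j - 1) := by
    have h3 : e - j = (e - j - 1) + 1 := by omega
    rw [h3, List.range'_succ]; simp
  have hoccsplit : pvOccF s l a e =
      (List.range' a (j - a)).filter (fun j => s[j]? = some l) ++
      (List.range' j (e - j)).filter (fun j => s[j]? = some l) := by
    rw [pvOccF, hsplit, List.filter_append]
  have h1 : (List.range' a (j - a)).filter (fun j => s[j]? = some l) = [] := by
    cases hx : (List.range' a (j - a)).filter (fun j => s[j]? = some l) with
    | nil => rfl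
    | cons x xs =>
      exfalso
      have hxlt : x < j := by
        have : x ∈ List.range' a (j - a) := List.mem_of_mem_filter (by rw [hx]; simp)
        have := List.mem_range'_1.mp this; omega
      have : (pvOccF s l a e).head? = some x := by rw [hoccsplit, hx]; simp
      rw [h] at this; simp at this; omega
  have hpj : (fun j => decide (s[j]? = some l)) j = true := by
    by_contra hnpj
    simp only [Bool.not_eq_true] at hnpj
    have : pvOccF s l a e = (List.range' (j+1) (e - j - 1)).filter (fun j => s[j]? = some l) := by
      rw [hoccsplit, h1, hsplit2]
      simp [hnpj]
    rw [this] at h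
    have : j ∈ List.range' (j+1) (e - j - 1) :=
      List.mem_of_mem_filter (List.mem_of_mem_head? h)
    have := List.mem_range'_1.mp this; omega
  refine ⟨?_, haj, hje⟩
  rw [hoccsplit, h1, hsplit2]
  simp only [List.nil_append, List.filter_cons, hpj, if_pos]
  rfl

lemma pvChainA (s : List Char) (l : Char) (i b : Int) (fuel : Nat) :
    ∀ (a : Nat) (iso : List (Int × Int)),
      (pvOccF s l a (pvE s.length b)).length < fuel →
      pvFindLoopA s l i b (PySem.Chars.findFrom s [l] (a : Int) (some b)) iso fuel =
        (pvOccF s l a (pvE s.length b)).foldl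
          (fun (acc : List (Int × Int)) (j : Nat) => PySem.Set.add acc (i, (j : Int) - i - 1)) iso := by
  induction fuel with
  | zero => intro a iso h; omega
  | succ fuel ih =>
    intro a iso h
    rw [pvFindFromSingle s l a b]
    cases hh : (pvOccF s l a (pvE s.length b)).head? with
    | none =>
      rw [List.head?_eq_none_iff] at hh
      rw [hh]
      simp [pvFindLoopA]
    | some j =>
      obtain ⟨hcons, haj, hje⟩ := pvOccF_head_cons hh
      rw [hcons]
      have hj1 : ((j : Int)) ≠ -1 := by omega
      simp only [pvFindLoopA, if_neg hj1, List.foldl_cons]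
      have hcast : ((j : Int)) + 1 = (((j + 1 : Nat)) : Int) := by push_cast; ring
      rw [hcast, ih (j+1) _ (by rw [hcons] at h; simpa using h)]

-- ---------- B side: the occurrence dict and the scan ----------
def pvPos (s : List Char) (c : Char) : List Nat :=
  (List.range s.length).filter (fun j => s[j]? = some c)

def pvRank (s : List Char) : List Nat :=
  (List.range s.length).map (fun k => (List.range k).countP (fun j => s[j]? = s[k]?))

lemma pvOccBuild_spec (s : List Char) :
    (∀ c, (pvOccBuild s).1.getD c [] = (pvPos s c).map (Nat.cast : Nat → Int)) ∧
    (pvOccBuild s).2 = pvRank s := by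
  induction s using List.reverseRecOn with
  | nil => constructor <;> simp [pvOccBuild, pvPos, pvRank, PySem.List.enumerate, PySem.Dict.getD, PySem.Dict.get?, PySem.Dict.empty]
  | append_singleton s d ih =>
    obtain ⟨ih1, ih2⟩ := ih
    have hstep : pvOccBuild (s ++ [d]) =
        ((pvOccBuild s).1.insert d (((pvOccBuild s).1.getD d []) ++ [(s.length : Int)]),
         (pvOccBuild s).2 ++ [((pvOccBuild s).1.getD d []).length]) := by
      unfold pvOccBuild
      rw [PySem.List.enumerate_append, List.foldl_append]
      simp [PySem.List.enumerate]
    have hpos_eq : ∀ c, c ≠ d → pvPos (s ++ [d]) c = pvPos s c := by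
      intro c hc
      unfold pvPos
      rw [List.length_append, List.length_singleton, List.range_succ, List.filter_append]
      have h2 : List.filter (fun j => decide ((s ++ [d])[j]? = some c)) [s.length] = [] := by
        simp
        exact Ne.symm hc
      rw [h2, List.append_nil]
      apply List.filter_congr
      intro j hj
      rw [List.getElem?_append_left (by simpa using hj)]
    have hpos_d : pvPos (s ++ [d]) d = pvPos s d ++ [s.length] := by
      unfold pvPos
      rw [List.length_append, List.length_singleton, List.range_succ, List.filter_append]
      have h2 : List.filter (fun j => decide ((s ++ [d])[j]? = some d)) [s.length] = [s.length] := by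
        simp
      rw [h2]
      congr 1
      apply List.filter_congr
      intro j hj
      rw [List.getElem?_append_left (by simpa using hj)]
    constructor
    · intro c
      rw [hstep]
      by_cases hc : c = d
      · subst hc
        rw [PySem.Dict.getD_insert, if_pos rfl, ih1 c, hpos_d]
        simp
      · rw [PySem.Dict.getD_insert, if_neg hc, ih1 c, hpos_eq c hc]
    · rw [hstep]
      simp only [ih1 d, ih2]
      unfold pvRank
      rw [List.length_append, List.length_singleton, List.range_succ, List.map_append]
      congr 1
      · apply List.map_congr_left
        intro k hk
        have hk' : k < s.length := by simpa using hk
        have e1 : (s ++ [d])[k]? = s[k]? := List.getElem?_append_left hk'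
        rw [e1]
        apply List.countP_congr
        intro j hj
        have hj' : j < k := by simpa using hj
        rw [List.getElem?_append_left (by omega)]
      · simp only [List.map_cons, List.map_nil]
        congr 1
        rw [List.length_map]
        have e1 : (s ++ [d])[s.length]? = some d := by
          simp
        rw [e1]
        unfold pvPos
        have hfc : List.filter (fun j => decide ((s ++ [d])[j]? = some d)) (List.range s.length)
            = List.filter (fun j => decide (s[j]? = some d)) (List.range s.length) := by
          apply List.filter_congr
          intro j hj
          have hj' : j < s.length := by simpa using hj
          rw [List.getElem?_append_left hj']
        rw [List.countP_eq_length_filter, hfc]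

lemma pvScanB_chain (i ms : Int) (ps : List Int) (hs : ps.Pairwise (· < ·)) :
    ∀ (m a : Nat) (res : List (Int × Int)), ps.length - a ≤ m → a ≤ ps.length →
    pvScanB i ms ps (PySem.List.pyRange (a : Int) (ps.length : Int)) res =
      ((ps.drop a).filter (fun j => decide (j - i ≤ ms))).foldl
        (fun acc j => PySem.Set.add acc (i, j - i - 1)) res := by
  intro m
  induction m with
  | zero =>
    intro a res hm ha
    have haa : a = ps.length := by omega
    subst haa
    rw [PySem.List.pyRange_one_eq_nil (by omega)]
    simp [pvScanB]
  | succ m ih =>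
    intro a res hm ha
    rcases Nat.eq_or_lt_of_le ha with haa | halt
    · subst haa
      rw [PySem.List.pyRange_one_eq_nil (by omega)]
      simp [pvScanB]
    · rw [PySem.List.pyRange_one_cons (by exact_mod_cast halt)]
      have hget : PySem.List.pyGetD ps ((a : Int)) 0 = ps[a] := by
        rw [PySem.List.pyGetD_natCast, List.getD_eq_getElem?_getD, List.getElem?_eq_getElem halt]
        rfl
      have hda : ps.drop a = ps[a] :: ps.drop (a+1) := (List.getElem_cons_drop halt).symm
      have hp : (ps.drop a).Pairwise (· < ·) := hs.sublist (List.drop_sublist a ps)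
      rw [hda] at hp
      have hlt := (List.pairwise_cons.mp hp).1
      rw [hda, List.filter_cons]
      by_cases hbr : ms < ps[a] - i
      · simp only [pvScanB, hget, if_pos hbr]
        rw [if_neg (by simp; omega)]
        have : (ps.drop (a+1)).filter (fun j => decide (j - i ≤ ms)) = [] := by
          rw [List.filter_eq_nil_iff]
          intro x hx
          have := hlt x hx
          simp; omega
        rw [this]
        simp
      · simp only [pvScanB, hget, if_neg hbr]
        rw [if_pos (by simp; omega)]
        rw [List.foldl_cons]
        have hc : ((a : Int)) + 1 = (((a+1 : Nat)) : Int) := by push_cast; ring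
        rw [hc, ih (a+1) _ (by omega) (by omega)]

lemma pvDropRank (s : List Char) (l : Char) (k : Nat) (hk : k < s.length)
    (hl : s[k]? = some l) :
    (List.range k).countP (fun j => s[j]? = s[k]?) + 1 ≤ (pvPos s l).length ∧
    (pvPos s l).drop ((List.range k).countP (fun j => s[j]? = s[k]?) + 1) =
      (List.range' (k+1) (s.length - (k+1))).filter (fun j => s[j]? = some l) := by
  set r := (List.range k).countP (fun j => s[j]? = s[k]?) with hrdef
  have hsplit : List.range s.length =
      List.range k ++ [k] ++ List.range' (k+1) (s.length - (k+1)) := by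
    rw [List.range_eq_range', show s.length = s.length - 0 from by omega]
    rw [pvRange_split 0 k s.length (by omega) (by omega)]
    rw [pvRange_split k (k+1) s.length (by omega) (by omega)]
    simp [List.range'_succ]
    rw [List.range_eq_range']
  have hposplit : pvPos s l =
      ((List.range k).filter (fun j => s[j]? = some l)) ++ [k] ++
      ((List.range' (k+1) (s.length - (k+1))).filter (fun j => s[j]? = some l)) := by
    rw [pvPos, hsplit, List.filter_append, List.filter_append]
    congr 1
    simp [hl]
  have hr : r = ((List.range k).filter (fun j => s[j]? = some l)).length := by
    rw [hrdef, ← List.countP_eq_length_filter]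
    apply List.countP_congr
    intro j _
    rw [hl]
  constructor
  · rw [hposplit]
    simp [hr]
  · rw [hposplit, hr, List.append_assoc, List.drop_append]
    simp

-- ---------- the common per-index window, and its two characterisations ----------
def pvW (s : List Char) (ms : Int) (k : Nat) : List Nat :=
  (List.range' (k+1) (s.length - (k+1))).filter
    (fun (j : Nat) => decide (s[j]? = s[k]?) && decide ((j : Int) - (k : Int) ≤ ms))

lemma pvWindow (s : List Char) (ms : Int) (k : Nat) (hk : k < s.length)
    (hnd : ms < 0 → ∀ j : Nat, k < j → j < s.length → s[j]? = s[k]? →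
      ¬((k : Int) + ms + 1 < 0 ∧ (j : Int) < (s.length : Int) + k + ms + 1)) :
    pvOccF s s[k] (k+1) (pvE s.length ((k : Int) + ms + 1)) = pvW s ms k := by
  have hl : s[k]? = some s[k] := List.getElem?_eq_getElem hk
  have hWf : pvW s ms k = ((List.range' (k+1) (s.length - (k+1))).filter
      (fun j => s[j]? = some s[k])).filter
      (fun (j : Nat) => decide ((j : Int) - (k : Int) ≤ ms)) := by
    rw [pvW, List.filter_filter]
    apply List.filter_congr
    intro j _
    rw [hl]
    rw [Bool.and_comm]
  rw [hWf]
  by_cases hms : 0 ≤ ms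
  · rw [List.filter_filter]
    set n := s.length with hn
    have hE : (pvE n ((k : Int) + ms + 1) : Int) =
        min (n : Int) ((k : Int) + ms + 1) := by
      unfold pvE; split_ifs <;> simp <;> omega
    set E := pvE n ((k : Int) + ms + 1) with hEdef
    have hkE : k + 1 ≤ E := by omega
    have hEn : E ≤ n := pvE_le _ _
    rw [pvOccF, pvRange_split (k+1) E n hkE hEn, List.filter_append]
    have h2 : (List.range' E (n - E)).filter
        (fun (j : Nat) => decide ((j : Int) - (k : Int) ≤ ms) && decide (s[j]? = some s[k])) = [] := by
      rw [List.filter_eq_nil_iff]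
      intro x hx
      have hxm := List.mem_range'_1.mp hx
      have : ¬ ((x : Int) - k ≤ ms) := by omega
      simp [this]
    rw [h2, List.append_nil]
    apply List.filter_congr
    intro j hj
    have hjm := List.mem_range'_1.mp hj
    have : ((j : Int) - k ≤ ms) := by omega
    simp [this]
  · push Not at hms
    have h1 : pvOccF s s[k] (k+1) (pvE s.length ((k : Int) + ms + 1)) = [] := by
      rw [pvOccF, List.filter_eq_nil_iff]
      intro j hj hpj
      have hjm := List.mem_range'_1.mp hj
      set E := pvE s.length ((k : Int) + ms + 1) with hEdef
      have hjE : j < E := by omega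
      have hkj : k < j := by omega
      have hEn : E ≤ s.length := pvE_le _ _
      have hjn : j < s.length := by omega
      have hneg : (k : Int) + ms + 1 < 0 ∧ (j : Int) < (s.length : Int) + k + ms + 1 := by
        unfold pvE at hEdef
        split_ifs at hEdef <;> omega
      have hjl : s[j]? = s[k]? := by rw [hl]; exact of_decide_eq_true hpj
      exact hnd hms j hkj hjn hjl hneg
    rw [h1]
    symm
    rw [List.filter_eq_nil_iff]
    intro x hx
    have hxm := List.mem_range'_1.mp (List.mem_of_mem_filter hx)
    have : ¬ ((x : Int) - k ≤ ms) := by omega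
    simp [this]

-- ---------- per-element step lemmas ----------
lemma pvAStep (s : List Char) (ms : Int) (k : Nat) (hk : k < s.length)
    (acc : List (Int × Int)) :
    pvFindLoopA s s[k] ((k : Int)) ((k : Int) + ms + 1)
        (PySem.Chars.findFrom s [s[k]] ((k : Int) + 1) (some ((k : Int) + ms + 1)))
        acc (s.length + 1) =
      (pvOccF s s[k] (k+1) (pvE s.length ((k : Int) + ms + 1))).foldl
        (fun (acc : List (Int × Int)) (j : Nat) =>
          PySem.Set.add acc ((k : Int), (j : Int) - k - 1)) acc := by
  have hc : ((k : Int)) + 1 = (((k+1 : Nat)) : Int) := by push_cast; ring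
  rw [hc]
  apply pvChainA
  have hle : (pvOccF s s[k] (k+1) (pvE s.length ((k : Int) + ms + 1))).length
      ≤ (List.range' (k+1) (pvE s.length ((k : Int) + ms + 1) - (k+1))).length :=
    List.length_filter_le _ _
  rw [List.length_range'] at hle
  have := pvE_le s.length ((k : Int) + ms + 1)
  omega

lemma pvBStep (s : List Char) (ms : Int) (k : Nat) (hk : k < s.length)
    (acc : List (Int × Int)) :
    pvScanB ((k : Int)) ms ((pvOccBuild s).1.getD s[k] [])
        (PySem.List.pyRange
          ((PySem.List.pyGetD (pvOccBuild s).2 ((k : Int)) 0 + 1 : Nat) : Int)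
          (((pvOccBuild s).1.getD s[k] []).length : Int))
        acc =
      (pvW s ms k).foldl
        (fun (acc : List (Int × Int)) (j : Nat) =>
          PySem.Set.add acc ((k : Int), (j : Int) - k - 1)) acc := by
  obtain ⟨hocc1, hocc2⟩ := pvOccBuild_spec s
  have hl : s[k]? = some s[k] := List.getElem?_eq_getElem hk
  have hrank : PySem.List.pyGetD (pvOccBuild s).2 ((k : Int)) 0 =
      (List.range k).countP (fun j => s[j]? = s[k]?) := by
    rw [hocc2, PySem.List.pyGetD_natCast, pvRank, List.getD_eq_getElem?_getD,
      List.getElem?_eq_getElem (by simpa using hk)]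
    simp
  set r := (List.range k).countP (fun j => s[j]? = s[k]?) with hrdef
  obtain ⟨hrlen, hdrop⟩ := pvDropRank s s[k] k hk hl
  set ps := (pvOccBuild s).1.getD s[k] [] with hps
  have hpsv : ps = (pvPos s s[k]).map (Nat.cast : Nat → Int) := hocc1 s[k]
  have hsorted : ps.Pairwise (· < ·) := by
    rw [hpsv]
    apply List.Pairwise.map
    · intro a b hab; exact_mod_cast hab
    · exact List.Pairwise.filter _ (List.pairwise_lt_range)
  have hlen : ps.length = (pvPos s s[k]).length := by rw [hpsv, List.length_map]
  rw [hrank]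
  rw [pvScanB_chain ((k : Int)) ms ps hsorted ps.length (r+1) acc (by omega) (by omega)]
  rw [hpsv, ← List.map_drop, hdrop, ← hdrop, List.filter_map, List.foldl_map]
  rw [hdrop]
  have hWeq : (List.filter ((fun j => decide (j - (k : Int) ≤ ms)) ∘ (Nat.cast : Nat → Int))
      ((List.range' (k+1) (s.length - (k+1))).filter (fun j => s[j]? = some s[k]))) = pvW s ms k := by
    rw [List.filter_filter, pvW]
    apply List.filter_congr
    intro j _
    simp only [Function.comp, hl]
    rw [Bool.and_comm]
  rw [hWeq]

-- the two fold steps over the enumerate list, named to state the congruence once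
lemma pvStep_eq (s : List Char) (ms : Int) (k : Nat) (hk : k < s.length)
    (hnd : ms < 0 → ∀ j : Nat, k < j → j < s.length → s[j]? = s[k]? →
      ¬((k : Int) + ms + 1 < 0 ∧ (j : Int) < (s.length : Int) + k + ms + 1))
    (acc : List (Int × Int)) :
    pvFindLoopA s s[k] ((k : Int)) ((k : Int) + ms + 1)
        (PySem.Chars.findFrom s [s[k]] ((k : Int) + 1) (some ((k : Int) + ms + 1)))
        acc (s.length + 1) =
      pvScanB ((k : Int)) ms ((pvOccBuild s).1.getD s[k] [])
        (PySem.List.pyRange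
          ((PySem.List.pyGetD (pvOccBuild s).2 ((k : Int)) 0 + 1 : Nat) : Int)
          (((pvOccBuild s).1.getD s[k] []).length : Int))
        acc := by
  rw [pvAStep s ms k hk acc, pvBStep s ms k hk acc, pvWindow s ms k hk hnd]

-- ---------- lemmas for the tightness theorem ----------
lemma pvAdd_ne_nil {α : Type} [BEq α] (acc : PySem.Set α) (x : α) :
    PySem.Set.add acc x ≠ [] := by
  cases acc with
  | nil => simp [PySem.Set.add, PySem.Set.contains]
  | cons a t =>
    rw [PySem.Set.add]
    split_ifs <;> simp

lemma pvFoldlAdd_ne_nil_of_acc (i : Int) (l : List Nat) :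
    ∀ acc : List (Int × Int), acc ≠ [] →
    l.foldl (fun (acc : List (Int × Int)) (j : Nat) =>
      PySem.Set.add acc (i, (j : Int) - i - 1)) acc ≠ [] := by
  induction l with
  | nil => intro acc h; simpa using h
  | cons x t ih =>
    intro acc _
    rw [List.foldl_cons]
    exact ih _ (pvAdd_ne_nil acc _)

lemma pvFoldlAdd_ne_nil_of_list (i : Int) (l : List Nat) (hl : l ≠ [])
    (acc : List (Int × Int)) :
    l.foldl (fun (acc : List (Int × Int)) (j : Nat) =>
      PySem.Set.add acc (i, (j : Int) - i - 1)) acc ≠ [] := by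
  cases l with
  | nil => exact absurd rfl hl
  | cons x t =>
    rw [List.foldl_cons]
    exact pvFoldlAdd_ne_nil_of_acc i t _ (pvAdd_ne_nil acc _)

lemma pvW_nil_of_neg (s : List Char) (ms : Int) (k : Nat) (hms : ms < 0) :
    pvW s ms k = [] := by
  rw [pvW, List.filter_eq_nil_iff]
  intro j hj
  have := List.mem_range'_1.mp hj
  have : ¬ ((j : Int) - (k : Int) ≤ ms) := by omega
  simp [this]

lemma pvAltNeg (ct : String) (ms : Int) (hms : ms < 0) :
    get_isomorphs_alt ct ms = [] := by
  unfold get_isomorphs_alt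
  rw [PySem.List.foldl_congr_mem _ _ (fun acc _ => acc) _ ?hst]
  case hst =>
    intro acc p hp
    rw [PySem.List.mem_enumerate_iff] at hp
    obtain ⟨k, hk, rfl⟩ := hp
    simp only [zero_add]
    rw [pvBStep ct.toList ms k hk acc, pvW_nil_of_neg ct.toList ms k hms]
    rfl
  have : ∀ (l : List (Int × Char)) (init : List (Int × Int)),
      l.foldl (fun acc _ => acc) init = init := by
    intro l
    induction l with
    | nil => intro init; rfl
    | cons x t ih => intro init; rw [List.foldl_cons]; exact ih init
  exact this _ _

lemma pvOuterPres (ct : String) (ms : Int) :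
    ∀ (l : List (Int × Char)), (∀ p ∈ l, p ∈ PySem.List.enumerate ct.toList) →
    ∀ acc : List (Int × Int), acc ≠ [] →
    l.foldl (fun iso p =>
      pvFindLoopA ct.toList p.2 p.1 (p.1 + ms + 1)
        (PySem.Chars.findFrom ct.toList [p.2] (p.1 + 1) (some (p.1 + ms + 1)))
        iso (ct.toList.length + 1)) acc ≠ [] := by
  intro l
  induction l with
  | nil => intro _ acc h; simpa using h
  | cons p t ih =>
    intro hmem acc hacc
    rw [List.foldl_cons]
    apply ih (fun q hq => hmem q (List.mem_cons_of_mem _ hq))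
    have hp := hmem p List.mem_cons_self
    rw [PySem.List.mem_enumerate_iff] at hp
    obtain ⟨k, hk, rfl⟩ := hp
    simp only [zero_add]
    rw [pvAStep ct.toList ms k hk acc]
    exact pvFoldlAdd_ne_nil_of_acc _ _ acc hacc

-- ===== VERDICT (by name: the statement is the Claim_ definition above) =====
theorem get_isomorphs_spec : Claim_unchanged_get_isomorphs := by
  intro ct ms _hdom
  unfold Spec_get_isomorphs
  intro hnd
  unfold get_isomorphs get_isomorphs_alt
  apply PySem.List.foldl_congr_mem
  intro acc p hp
  rw [PySem.List.mem_enumerate_iff] at hp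
  obtain ⟨k, hk, rfl⟩ := hp
  simp only [zero_add]
  apply pvStep_eq ct.toList ms k hk
  intro hms j hkj hjn hjl hcontra
  apply hnd
  refine ⟨hms, k, Finset.mem_range.mpr (by omega), j, Finset.mem_range.mpr hjn,
    hkj, ?_, hcontra.1, hcontra.2⟩
  rw [← hjl]

theorem get_isomorphs_changed : Claim_changed_get_isomorphs := by
  unfold Claim_changed_get_isomorphs; decide

theorem get_isomorphs_tight : Claim_exact_get_isomorphs := by
  intro ct ms _hdom hd
  obtain ⟨hms, i0, hi0m, j0, hj0m, hij, heq, hneg1, hneg2⟩ := hd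
  rw [Finset.mem_range] at hi0m hj0m
  rw [pvAltNeg ct ms hms]
  -- A is nonempty: the pair (i0, j0 - i0 - 1) is produced
  unfold get_isomorphs
  have hlen : i0 < (PySem.List.enumerate ct.toList).length := by
    rw [PySem.List.length_enumerate]; omega
  have hsplit : PySem.List.enumerate ct.toList =
      (PySem.List.enumerate ct.toList).take i0 ++
      (PySem.List.enumerate ct.toList)[i0] :: (PySem.List.enumerate ct.toList).drop (i0+1) := by
    rw [List.getElem_cons_drop hlen, List.take_append_drop]
  rw [hsplit, List.foldl_append, List.foldl_cons]
  apply pvOuterPres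
  · intro p hp
    rw [hsplit]
    exact List.mem_append_right _ (List.mem_cons_of_mem _ hp)
  · rw [PySem.List.getElem_enumerate]
    simp only [zero_add]
    rw [pvAStep ct.toList ms i0 (by omega)]
    apply pvFoldlAdd_ne_nil_of_list
    intro hnil
    rw [List.eq_nil_iff_forall_not_mem] at hnil
    apply hnil j0
    rw [pvOccF, List.mem_filter]
    have hE : j0 < pvE ct.toList.length ((i0 : Int) + ms + 1) := by
      unfold pvE
      split_ifs <;> omega
    constructor
    · rw [List.mem_range'_1]
      omega
    · have : ct.toList[i0]? = some (ct.toList[i0]) := List.getElem?_eq_getElem (by omega)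
      rw [← heq] at *
      simp [this]
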